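-- pv_equiv track=rewrite | github.com/GajewyJ/TiDA5 | 19.09.2024 Egzamin czerwiec 2024/gra_w_kosci.py | liczPunkty
-- ===== SOURCE A (Python) =====
-- def liczPunkty(wylosowaneLiczby):
--     punkty = 0
--
--     for i in range(1, 7):
--         iloscWystapien = 0
--         for j in range(len(wylosowaneLiczby)):
--             if(wylosowaneLiczby[j] == i):
--                 iloscWystapien += 1
--         if(iloscWystapien > 1):
--             punkty += i * iloscWystapien
--
--     return punkty
-- ===== SOURCE B (Python) =====
-- def liczPunkty(wylosowaneLiczby):
--     czestosc = {}
--     for liczba in wylosowaneLiczby: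
--         czestosc[liczba] = czestosc.get(liczba, 0) + 1
--     punkty = 0
--     for wartosc, ile in czestosc.items():
--         if ile > 1 and 1 <= wartosc <= 6:
--             punkty += wartosc * ile
--     return punkty
-- ===== Notes on version B (the rewrite author's own statement) =====
-- stated objective: alternative
-- what changed: Replaced A's six repeated scans of the list (one count per face 1..6) with a single pass building a frequency dict and one pass over the dict's distinct (value, count) items, keeping the count>1 and 1<=value<=6 filter.
import Mathlib
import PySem

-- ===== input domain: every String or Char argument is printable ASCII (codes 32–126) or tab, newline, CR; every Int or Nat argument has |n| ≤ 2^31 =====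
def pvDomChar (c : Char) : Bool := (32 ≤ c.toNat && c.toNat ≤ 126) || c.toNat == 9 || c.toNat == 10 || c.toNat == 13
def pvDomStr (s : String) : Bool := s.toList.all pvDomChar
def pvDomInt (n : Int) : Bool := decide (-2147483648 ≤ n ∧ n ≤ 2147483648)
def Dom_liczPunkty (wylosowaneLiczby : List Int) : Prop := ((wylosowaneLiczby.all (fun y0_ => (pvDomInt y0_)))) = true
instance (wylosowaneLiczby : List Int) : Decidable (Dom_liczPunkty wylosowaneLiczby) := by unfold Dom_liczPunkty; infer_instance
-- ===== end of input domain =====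

-- B replaces A's six passes over the list (one per face) by one frequency-dict pass plus one pass
-- over the dict's distinct (value, count) items; same return value, different traversal (alternative).

-- ===== PORT A =====
def liczPunkty (wylosowaneLiczby : List Int) : Int :=
  (PySem.List.pyRange 1 7).foldl (fun punkty i =>
    let iloscWystapien : Int :=
      (PySem.List.pyRange 0 (wylosowaneLiczby.length : Int)).foldl
        (fun c j => if PySem.List.pyGetD wylosowaneLiczby j 0 == i then c + 1 else c) 0
    if iloscWystapien > 1 then punkty + i * iloscWystapien else punkty) 0

-- ===== PORT B =====
def liczPunkty_alt (wylosowaneLiczby : List Int) : Int :=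
  let czestosc : PySem.Dict Int Int :=
    wylosowaneLiczby.foldl (fun d liczba => d.modify liczba 0 (· + 1)) PySem.Dict.empty
  czestosc.items.foldl
    (fun punkty p => if p.2 > 1 ∧ 1 ≤ p.1 ∧ p.1 ≤ 6 then punkty + p.1 * p.2 else punkty) 0

def Spec_liczPunkty (wylosowaneLiczby : List Int) (out : Int) : Prop := out = liczPunkty_alt wylosowaneLiczby
instance (wylosowaneLiczby : List Int) (out : Int) : Decidable (Spec_liczPunkty wylosowaneLiczby out) := by unfold Spec_liczPunkty; infer_instance

def Claim_equal_liczPunkty : Prop := ∀ (wylosowaneLiczby : List Int), Dom_liczPunkty wylosowaneLiczby → Spec_liczPunkty wylosowaneLiczby (liczPunkty wylosowaneLiczby)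

-- ===== CLAIM is above; LEMMAS AND PROOFS =====

-- the per-face contribution both programs sum
def pvContrib (xs : List Int) (k : Int) : Int :=
  if (xs.count k : Int) > 1 ∧ 1 ≤ k ∧ k ≤ 6 then k * (xs.count k : Int) else 0

theorem liczPunkty_eq_sum (xs : List Int) :
    liczPunkty xs = (([1, 2, 3, 4, 5, 6] : List Int).map (pvContrib xs)).sum := by
  unfold liczPunkty
  have hinner : ∀ i : Int,
      (PySem.List.pyRange 0 (xs.length : Int)).foldl
        (fun c j => if PySem.List.pyGetD xs j 0 == i then c + 1 else c) 0 = (xs.count i : Int) := by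
    intro i
    rw [PySem.List.foldl_pyRange_pyGetD' xs 0 (fun c v => if v == i then c + 1 else c) 0 le_rfl,
      PySem.List.foldl_count_if]
    simp [List.count]
  show (PySem.List.pyRange 1 7).foldl _ 0 = _
  have hr : (PySem.List.pyRange 1 7 : List Int) = [1, 2, 3, 4, 5, 6] := by decide
  rw [hr]
  simp only [List.foldl, hinner, pvContrib, List.map, List.sum_cons, List.sum_nil]
  norm_num
  split_ifs <;> omega

theorem liczPunkty_alt_eq_sum (xs : List Int) :
    liczPunkty_alt xs = ((PySem.Set.ofList xs : List Int).map (pvContrib xs)).sum := by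
  show (((xs : List Int).foldl (fun d liczba => d.modify liczba 0 (· + 1))
      PySem.Dict.empty).items).foldl
      (fun punkty p => if p.2 > 1 ∧ 1 ≤ p.1 ∧ p.1 ≤ 6 then punkty + p.1 * p.2 else punkty) 0 = _
  rw [← PySem.Dict.counter_eq_foldl, PySem.Dict.items_counter]
  have : ∀ (l : List Int) (a : Int),
      (l.map (fun k => (k, (xs.count k : Int)))).foldl
        (fun punkty p => if p.2 > 1 ∧ 1 ≤ p.1 ∧ p.1 ≤ 6 then punkty + p.1 * p.2 else punkty) a
      = a + (l.map (pvContrib xs)).sum := by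
    intro l a
    induction l generalizing a with
    | nil => simp
    | cons x t ih =>
      simp only [List.map, List.foldl, List.sum_cons, ih, pvContrib]
      split_ifs <;> ring
  simpa using this (PySem.Set.ofList xs) 0

theorem sums_agree (xs : List Int) :
    (([1, 2, 3, 4, 5, 6] : List Int).map (pvContrib xs)).sum
      = ((PySem.Set.ofList xs : List Int).map (pvContrib xs)).sum := by
  have h1 : (([1, 2, 3, 4, 5, 6] : List Int)).Nodup := by decide
  have h2 : (PySem.Set.ofList xs : List Int).Nodup := PySem.Set.nodup_ofList xs
  rw [← List.sum_toFinset _ h1, ← List.sum_toFinset _ h2]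
  have hz1 : ∀ x ∈ (([1, 2, 3, 4, 5, 6] : List Int)).toFinset,
      x ∉ (([1, 2, 3, 4, 5, 6] : List Int)).toFinset ∩ (PySem.Set.ofList xs : List Int).toFinset →
      pvContrib xs x = 0 := by
    intro x hx hnx
    have hxs : x ∉ xs := by
      intro hmem
      exact hnx (Finset.mem_inter.mpr ⟨hx, List.mem_toFinset.mpr ((PySem.Set.mem_ofList xs x).mpr hmem)⟩)
    have : xs.count x = 0 := List.count_eq_zero.mpr hxs
    simp [pvContrib, this]
  have hz2 : ∀ x ∈ (PySem.Set.ofList xs : List Int).toFinset,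
      x ∉ (([1, 2, 3, 4, 5, 6] : List Int)).toFinset ∩ (PySem.Set.ofList xs : List Int).toFinset →
      pvContrib xs x = 0 := by
    intro x hx hnx
    have hr : ¬ (1 ≤ x ∧ x ≤ 6) := by
      intro hb
      have hx1 : x ∈ (([1, 2, 3, 4, 5, 6] : List Int)).toFinset := by
        simp only [List.toFinset_cons, List.toFinset_nil, Finset.mem_insert] at *
        omega
      exact hnx (Finset.mem_inter.mpr ⟨hx1, hx⟩)
    simp only [pvContrib]
    rw [if_neg (by tauto)]
  rw [← Finset.sum_subset Finset.inter_subset_left hz1,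
      ← Finset.sum_subset Finset.inter_subset_right hz2]

theorem liczPunkty_spec : Claim_equal_liczPunkty := by
  intro xs _
  unfold Spec_liczPunkty
  rw [liczPunkty_eq_sum, liczPunkty_alt_eq_sum, sums_agree]
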